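-- pv_equiv track=rewrite | github.com/JoeBussard/polywordleapi | src/api/backend_run_game.py | compare_guess_to_solution
-- ===== SOURCE A (Python) =====
-- def compare_guess_to_solution(guess, solution):
--     """trying to get this to o(n) time, but still o(n^2) to check yellows."""
--     if guess == solution:
--         winner = 2
--     else:
--         winner = 1
--     guess_hash, solution_hash, result_hash = {}, {}, {}
--     for i in range(5):
--         guess_hash[i] = guess[i]
--         solution_hash[i] = solution[i]
--         result_hash[i] = "absent"
--         if guess_hash[i] == solution_hash[i]:
--             result_hash[i] = "correct"
--             guess_hash[i], solution_hash[i] = "", ""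
--
--     for guess_key in range(5):
--         for solution_key in range(5):
--             if guess_hash[guess_key] == solution_hash[solution_key] and result_hash[guess_key] == "absent":
--                 result_hash[guess_key] = "present"
--                 guess_hash[guess_key], solution_hash[solution_key] = "", ""
--     return result_hash, winner
-- ===== SOURCE B (Python) =====
-- def compare_guess_to_solution(guess, solution):
--     """Closed-form per-position scoring: no mutable consumption state."""
--     winner = 2 if guess == solution else 1
--     result = {}
--     for i in range(5):
--         g = guess[i]
--         if g == solution[i]:
--             result[i] = "correct"
--         else:
--             avail = 0
--             for j in range(5):
--                 if solution[j] == g and solution[j] != guess[j]: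
--                     avail += 1
--             used = 0
--             for j in range(i):
--                 if guess[j] == g and guess[j] != solution[j]:
--                     used += 1
--             result[i] = "present" if used < avail else "absent"
--     return result, winner
-- ===== Notes on version B (the rewrite author's own statement) =====
-- stated objective: alternative
-- what changed: Replaced A's stateful consumption simulation (three index-keyed dicts with letters blanked out as they are matched by a nested scan) with a stateless closed-form per position: a letter is 'present' iff the number of earlier non-correct guess occurrences of it is smaller than its count among non-correct solution positions.
import Mathlib
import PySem

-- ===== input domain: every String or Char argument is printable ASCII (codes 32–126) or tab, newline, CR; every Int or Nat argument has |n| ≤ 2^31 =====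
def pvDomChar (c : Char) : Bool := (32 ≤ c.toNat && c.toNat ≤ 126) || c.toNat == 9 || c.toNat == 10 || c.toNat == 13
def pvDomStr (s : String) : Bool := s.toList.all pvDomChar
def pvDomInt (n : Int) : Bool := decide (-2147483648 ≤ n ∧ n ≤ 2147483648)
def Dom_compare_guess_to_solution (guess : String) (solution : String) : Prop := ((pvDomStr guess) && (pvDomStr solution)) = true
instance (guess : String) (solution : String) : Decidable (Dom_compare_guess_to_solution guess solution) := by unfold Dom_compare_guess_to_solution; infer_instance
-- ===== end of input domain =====

-- B is an ALTERNATIVE implementation: a stateless closed-form count per position instead of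
-- A's stateful consumption simulation over three index-keyed dicts; same cost, no speed claim.
-- Python one-character strings and the "" sentinel A writes into its dicts are represented as
-- List Char ([c] resp. []), which is exact for equality tests on these values.

-- ===== PORT A =====
-- state of A's loops: (guess_hash, solution_hash, result_hash)
def pvSt : Type := PySem.Dict Int (List Char) × PySem.Dict Int (List Char) × PySem.Dict Int String

-- body of A's first loop (for i in range(5))
def pvStep1 (g s : List Char) (st : pvSt) (i : Int) : pvSt :=
  let gh := st.1.insert i (PySem.List.pyGet? g i).toList
  let sh := st.2.1.insert i (PySem.List.pyGet? s i).toList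
  let rh := st.2.2.insert i "absent"
  if gh.getD i [] == sh.getD i [] then
    (gh.insert i [], sh.insert i [], rh.insert i "correct")
  else (gh, sh, rh)

-- body of A's inner loop (for solution_key in range(5)), guess_key fixed
def pvInner (gk : Int) (st : pvSt) (sk : Int) : pvSt :=
  if st.1.getD gk [] == st.2.1.getD sk [] && st.2.2.getD gk "" == "absent" then
    (st.1.insert gk [], st.2.1.insert sk [], st.2.2.insert gk "present")
  else st

-- body of A's outer loop (for guess_key in range(5))
def pvOuter (st : pvSt) (gk : Int) : pvSt :=
  (PySem.List.pyRange 0 5 1).foldl (pvInner gk) st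

def compare_guess_to_solution (guess : String) (solution : String) : (List (Int × String)) × Int :=
  let winner : Int := if guess = solution then 2 else 1
  let g := guess.toList
  let s := solution.toList
  let st1 := (PySem.List.pyRange 0 5 1).foldl (pvStep1 g s) (PySem.Dict.empty, PySem.Dict.empty, PySem.Dict.empty)
  let st2 := (PySem.List.pyRange 0 5 1).foldl pvOuter st1
  (st2.2.2.items, winner)

-- ===== PORT B =====
-- body of B's loop (for i in range(5))
def pvBbody (g s : List Char) (res : PySem.Dict Int String) (i : Int) : PySem.Dict Int String :=
  let gi := (PySem.List.pyGet? g i).toList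
  if gi == (PySem.List.pyGet? s i).toList then
    res.insert i "correct"
  else
    let avail := (PySem.List.pyRange 0 5 1).foldl (fun (a : Int) j =>
      if (PySem.List.pyGet? s j).toList == gi && !((PySem.List.pyGet? s j).toList == (PySem.List.pyGet? g j).toList) then a + 1 else a) 0
    let used := (PySem.List.pyRange 0 i 1).foldl (fun (a : Int) j =>
      if (PySem.List.pyGet? g j).toList == gi && !((PySem.List.pyGet? g j).toList == (PySem.List.pyGet? s j).toList) then a + 1 else a) 0
    res.insert i (if used < avail then "present" else "absent")

def compare_guess_to_solution_alt (guess : String) (solution : String) : (List (Int × String)) × Int :=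
  let winner : Int := if guess = solution then 2 else 1
  let g := guess.toList
  let s := solution.toList
  let res := (PySem.List.pyRange 0 5 1).foldl (pvBbody g s) PySem.Dict.empty
  (res.items, winner)

-- ===== PRECONDITION & SPEC =====
-- Pre_ excludes exactly the inputs where Python A raises IndexError: a guess or solution
-- shorter than 5 characters (B raises there too).
def Pre_compare_guess_to_solution (guess : String) (solution : String) : Prop :=
  5 ≤ PySem.Str.len guess ∧ 5 ≤ PySem.Str.len solution
instance (guess : String) (solution : String) : Decidable (Pre_compare_guess_to_solution guess solution) := by unfold Pre_compare_guess_to_solution; infer_instance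

def pvWitness_compare_guess_to_solution : String × String := ("crane", "cargo")

def Spec_compare_guess_to_solution (guess : String) (solution : String) (out : (List (Int × String)) × Int) : Prop := out = compare_guess_to_solution_alt guess solution
instance (guess : String) (solution : String) (out : (List (Int × String)) × Int) : Decidable (Spec_compare_guess_to_solution guess solution out) := by unfold Spec_compare_guess_to_solution; infer_instance

-- ===== CLAIM (what is proved, stated in full; the proofs are below) =====
def Claim_equal_compare_guess_to_solution : Prop := ∀ (guess : String) (solution : String), Dom_compare_guess_to_solution guess solution → Pre_compare_guess_to_solution guess solution → Spec_compare_guess_to_solution guess solution (compare_guess_to_solution guess solution)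

-- ===== LEMMAS AND PROOFS =====

-- B's per-position value (identical to the value pvBbody stores)
def pvBval (g s : List Char) (i : Int) : String :=
  let gi := (PySem.List.pyGet? g i).toList
  if gi == (PySem.List.pyGet? s i).toList then "correct"
  else
    let avail := (PySem.List.pyRange 0 5 1).foldl (fun (a : Int) j =>
      if (PySem.List.pyGet? s j).toList == gi && !((PySem.List.pyGet? s j).toList == (PySem.List.pyGet? g j).toList) then a + 1 else a) 0
    let used := (PySem.List.pyRange 0 i 1).foldl (fun (a : Int) j =>
      if (PySem.List.pyGet? g j).toList == gi && !((PySem.List.pyGet? g j).toList == (PySem.List.pyGet? s j).toList) then a + 1 else a) 0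
    if used < avail then "present" else "absent"

-- values of A's three dicts after the first loop
def pvGv (g s : List Char) (i : Int) : List Char :=
  if (PySem.List.pyGet? g i).toList = (PySem.List.pyGet? s i).toList then [] else (PySem.List.pyGet? g i).toList
def pvSv (g s : List Char) (i : Int) : List Char :=
  if (PySem.List.pyGet? g i).toList = (PySem.List.pyGet? s i).toList then [] else (PySem.List.pyGet? s i).toList
def pvRv (g s : List Char) (i : Int) : String :=
  if (PySem.List.pyGet? g i).toList = (PySem.List.pyGet? s i).toList then "correct" else "absent"

def pvAvail (g s : List Char) (c : List Char) : Nat :=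
  ((List.range 5).map (fun (j : Nat) => pvSv g s (j : Int))).count c
def pvUsed (g s : List Char) (k : Nat) (c : List Char) : Nat :=
  ((List.range k).map (fun (j : Nat) => pvGv g s (j : Int))).count c

-- result_hash after the first k outer-loop keys have been processed
def pvRdict (g s : List Char) (k : Nat) : PySem.Dict Int String :=
  PySem.Dict.mk ((List.range 5).map (fun (i : Nat) => ((i : Int), if i < k then pvBval g s (i : Int) else pvRv g s (i : Int))))

-- loop invariant of A's outer loop
def pvInv (g s : List Char) (k : Nat) (st : pvSt) : Prop :=
  st.2.2 = pvRdict g s k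
  ∧ (∀ i : Nat, k ≤ i → i < 5 → st.1.getD (i : Int) [] = pvGv g s (i : Int))
  ∧ (∀ c : List Char, c ≠ [] →
      ((List.range 5).map (fun (j : Nat) => st.2.1.getD (j : Int) [])).count c = pvAvail g s c - pvUsed g s k c)

theorem pv_getD_mk_map_range {ν : Type} (F : Nat → ν) (n i : Nat) (h : i < n) (d : ν) :
    (PySem.Dict.mk ((List.range n).map (fun (t : Nat) => ((t : Int), F t)))).getD (i : Int) d = F i := by
  apply PySem.Dict.getD_of_mem_items
  · exact List.mem_map.2 ⟨i, List.mem_range.2 h, rfl⟩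
  · rw [PySem.Dict.keys_mk, List.map_map]
    refine List.Nodup.map ?_ List.nodup_range
    intro a b hab
    simpa using hab

theorem pv_nonnil (g : List Char) (k : Nat) (hk : k < 5) (hg : 5 ≤ g.length) :
    (PySem.List.pyGet? g (k : Int)).toList = [g[k]'(by omega)] := by
  rw [PySem.List.pyGet?_natCast, List.getElem?_eq_getElem (by omega)]
  rfl

theorem pvBval_of_ne (g s : List Char) (k : Nat) (hk : k < 5) (hg : 5 ≤ g.length) (_hs : 5 ≤ s.length)
    (hne : (PySem.List.pyGet? g (k : Int)).toList ≠ (PySem.List.pyGet? s (k : Int)).toList) :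
    pvBval g s (k : Int) =
      if pvUsed g s k ((PySem.List.pyGet? g (k : Int)).toList) < pvAvail g s ((PySem.List.pyGet? g (k : Int)).toList)
      then "present" else "absent" := by
  have hv : (PySem.List.pyGet? g (k : Int)).toList ≠ [] := by
    rw [pv_nonnil g k hk hg]; simp
  unfold pvBval
  rw [if_neg (by simpa using hne)]
  have h5 : PySem.List.pyRange 0 5 1 = (List.range 5).map (fun t : Nat => (t : Int)) := by
    exact_mod_cast PySem.List.pyRange_zero_natCast 5
  have hkr : PySem.List.pyRange 0 (k : Int) 1 = (List.range k).map (fun t : Nat => (t : Int)) :=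
    PySem.List.pyRange_zero_natCast k
  rw [h5, hkr, PySem.List.foldl_count_if, PySem.List.foldl_count_if]
  rw [List.countP_map, List.countP_map]
  have hav : List.countP ((fun j => (PySem.List.pyGet? s j).toList == (PySem.List.pyGet? g (k:Int)).toList &&
        !((PySem.List.pyGet? s j).toList == (PySem.List.pyGet? g j).toList)) ∘ (fun t : Nat => (t : Int))) (List.range 5)
      = pvAvail g s ((PySem.List.pyGet? g (k : Int)).toList) := by
    unfold pvAvail
    rw [List.count_eq_countP, List.countP_map]
    apply List.countP_congr
    intro j _
    simp only [Function.comp, pvSv, beq_iff_eq, Bool.and_eq_true, Bool.not_eq_true',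
      beq_eq_false_iff_ne, ne_eq, PySem.List.pyGet?_natCast] at *
    split_ifs with hgs
    · exact ⟨fun h => absurd hgs.symm h.2, fun h => absurd h.symm hv⟩
    · exact ⟨fun h => h.1, fun h => ⟨h, fun e => hgs e.symm⟩⟩
  have hus : List.countP ((fun j => (PySem.List.pyGet? g j).toList == (PySem.List.pyGet? g (k:Int)).toList &&
        !((PySem.List.pyGet? g j).toList == (PySem.List.pyGet? s j).toList)) ∘ (fun t : Nat => (t : Int))) (List.range k)
      = pvUsed g s k ((PySem.List.pyGet? g (k : Int)).toList) := by
    unfold pvUsed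
    rw [List.count_eq_countP, List.countP_map]
    apply List.countP_congr
    intro j _
    simp only [Function.comp, pvGv, beq_iff_eq, Bool.and_eq_true, Bool.not_eq_true',
      beq_eq_false_iff_ne, ne_eq, PySem.List.pyGet?_natCast] at *
    split_ifs with hgs
    · exact ⟨fun h => absurd hgs h.2, fun h => absurd h.symm hv⟩
    · exact ⟨fun h => h.1, fun h => ⟨h, hgs⟩⟩
  rw [hav, hus]
  norm_num

theorem pv_inert (js : List Int) (gk : Int) (st : pvSt) (h : st.2.2.getD gk "" ≠ "absent") :
    js.foldl (pvInner gk) st = st := by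
  induction js with
  | nil => rfl
  | cons j tl ih =>
    have hstep : pvInner gk st j = st := by
      simp [pvInner, beq_eq_false_iff_ne.2 h]
    rw [List.foldl_cons, hstep, ih]

theorem pv_scan (js : List Int) (gk : Int) (st : pvSt) (h : st.2.2.getD gk "" = "absent") :
    js.foldl (pvInner gk) st =
      match js.find? (fun j => st.1.getD gk [] == st.2.1.getD j []) with
      | none => st
      | some j0 => (st.1.insert gk [], st.2.1.insert j0 [], st.2.2.insert gk "present") := by
  induction js with
  | nil => rfl
  | cons j tl ih =>
    by_cases hc : (st.1.getD gk [] == st.2.1.getD j []) = true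
    · simp only [List.find?_cons, hc]
      have hstep : pvInner gk st j = (st.1.insert gk [], st.2.1.insert j [], st.2.2.insert gk "present") := by
        simp [pvInner, hc, h]
      rw [List.foldl_cons, hstep]
      apply pv_inert
      show (st.2.2.insert gk "present").getD gk "" ≠ "absent"
      rw [PySem.Dict.getD_insert_self]
      decide
    · simp only [List.find?_cons, hc]
      have hstep : pvInner gk st j = st := by simp [pvInner, hc]
      rw [List.foldl_cons, hstep, ih]

theorem pv_vec_insert (sh : PySem.Dict Int (List Char)) (j0 : Int) (h0 : 0 ≤ j0) (h5 : j0 < 5) :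
    (List.range 5).map (fun (j : Nat) => (sh.insert j0 []).getD (j : Int) []) =
      ((List.range 5).map (fun (j : Nat) => sh.getD (j : Int) [])).set j0.toNat [] := by
  interval_cases j0 <;>
    simp [List.range_succ, PySem.Dict.getD_insert]

theorem pv_count_set (l : List (List Char)) (m : Nat) (hm : m < l.length) (v c : List Char)
    (hv : l[m] = v) (hc : c ≠ []) :
    (l.set m ([] : List Char)).count c = l.count c - (if c = v then 1 else 0) := by
  rw [List.set_eq_take_append_cons_drop, if_pos hm]
  conv_rhs => rw [show l = l.take m ++ l[m] :: l.drop (m+1) by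
    rw [List.getElem_cons_drop hm, List.take_append_drop]]
  simp only [List.count_append, List.count_cons, hv]
  rcases eq_or_ne c v with rfl | hne
  · simp [hc]
  · simp [hne, Ne.symm hne, hc]

theorem pv_rdict_succ_of_eq (g s : List Char) (k : Nat)
    (h : pvBval g s (k : Int) = pvRv g s (k : Int)) :
    pvRdict g s (k + 1) = pvRdict g s k := by
  unfold pvRdict
  congr 1
  apply List.map_congr_left
  intro i hi
  by_cases hik : i = k
  · subst hik
    simp [h]
  · have : i < k + 1 ↔ i < k := by omega
    simp [this]

theorem pv_rdict_succ_of_fire (g s : List Char) (k : Nat) (hk : k < 5)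
    (h : pvBval g s (k : Int) = "present") :
    (pvRdict g s k).insert (k : Int) "present" = pvRdict g s (k + 1) := by
  have hcont : (pvRdict g s k).contains (k : Int) = true := by
    rw [PySem.Dict.contains_iff_mem_keys]
    unfold pvRdict
    rw [PySem.Dict.keys_mk, List.map_map]
    exact List.mem_map.2 ⟨k, List.mem_range.2 hk, rfl⟩
  apply PySem.Dict.ext
  rw [PySem.Dict.items_insert_of_contains _ _ hcont]
  unfold pvRdict
  show List.map (fun p => if (p.1 == (k : Int)) = true then ((k : Int), "present") else p)
      ((List.range 5).map (fun (i : Nat) => ((i : Int), if i < k then pvBval g s (i : Int) else pvRv g s (i : Int)))) =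
    (List.range 5).map (fun (i : Nat) => ((i : Int), if i < k + 1 then pvBval g s (i : Int) else pvRv g s (i : Int)))
  rw [List.map_map]
  apply List.map_congr_left
  intro i hi
  by_cases hik : i = k
  · subst hik
    simp [h]
  · have h2 : i < k + 1 ↔ i < k := by omega
    simp [h2, hik]

theorem pv_step1_eq (g s : List Char) (st : pvSt) (i : Int) :
    pvStep1 g s st i =
      (st.1.insert i (pvGv g s i), st.2.1.insert i (pvSv g s i), st.2.2.insert i (pvRv g s i)) := by
  by_cases h : (PySem.List.pyGet? g i).toList = (PySem.List.pyGet? s i).toList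
  · simp [pvStep1, pvGv, pvSv, pvRv, h, PySem.Dict.getD_insert_self, PySem.Dict.insert_insert_self]
  · simp [pvStep1, pvGv, pvSv, pvRv, h, PySem.Dict.getD_insert_self]

theorem pv_inv_init (g s : List Char) :
    pvInv g s 0 ((PySem.List.pyRange 0 5 1).foldl (pvStep1 g s)
      (PySem.Dict.empty, PySem.Dict.empty, PySem.Dict.empty)) := by
  have hr : PySem.List.pyRange 0 5 1 = [0, 1, 2, 3, 4] := by decide
  rw [hr]
  simp only [List.foldl_cons, List.foldl_nil, pv_step1_eq]
  refine ⟨?_, ?_, ?_⟩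
  · show _ = pvRdict g s 0
    unfold pvRdict
    simp [List.range_succ]
    rfl
  · intro i _ h5
    interval_cases i <;> simp [PySem.Dict.getD_insert]
  · intro c hc
    unfold pvAvail pvUsed
    simp [List.range_succ, PySem.Dict.getD_insert]

theorem pv_outer_step (g s : List Char) (k : Nat) (hk : k < 5) (hg : 5 ≤ g.length) (hs : 5 ≤ s.length)
    (st : pvSt) (h : pvInv g s k st) : pvInv g s (k + 1) (pvOuter st (k : Int)) := by
  obtain ⟨hR, hG, hC⟩ := h
  have hRk : st.2.2.getD (k : Int) "" = pvRv g s (k : Int) := by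
    rw [hR]
    unfold pvRdict
    rw [pv_getD_mk_map_range (fun i => if i < k then pvBval g s (i : Int) else pvRv g s (i : Int)) 5 k hk]
    simp
  unfold pvOuter
  by_cases hce : (PySem.List.pyGet? g (k : Int)).toList = (PySem.List.pyGet? s (k : Int)).toList
  · -- position k is "correct": the inner loop does nothing
    have hRv : pvRv g s (k : Int) = "correct" := by unfold pvRv; rw [if_pos hce]
    have hbv : pvBval g s (k : Int) = "correct" := by
      simp only [pvBval, beq_iff_eq]
      rw [if_pos hce]
    have hstop : (PySem.List.pyRange 0 5 1).foldl (pvInner (k : Int)) st = st := by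
      apply pv_inert
      rw [hRk, hRv]
      decide
    rw [hstop]
    refine ⟨?_, ?_, ?_⟩
    · rw [hR, ← pv_rdict_succ_of_eq g s k (by rw [hbv, hRv])]
    · intro i hi h5
      exact hG i (by omega) h5
    · intro c hc
      rw [hC c hc]
      have : pvUsed g s (k + 1) c = pvUsed g s k c := by
        unfold pvUsed
        rw [List.range_succ, List.map_append, List.count_append]
        have h0 : pvGv g s (k : Int) = [] := by unfold pvGv; rw [if_pos hce]
        simp [h0, hc]
      rw [this]
  · -- position k is not "correct": the inner loop scans for a match
    have hRv : pvRv g s (k : Int) = "absent" := by unfold pvRv; rw [if_neg hce]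
    have habs : st.2.2.getD (k : Int) "" = "absent" := by rw [hRk, hRv]
    have hGk : st.1.getD (k : Int) [] = pvGv g s (k : Int) := hG k le_rfl hk
    have hgvk : pvGv g s (k : Int) = (PySem.List.pyGet? g (k : Int)).toList := by
      unfold pvGv; rw [if_neg hce]
    have hv : (PySem.List.pyGet? g (k : Int)).toList ≠ [] := by rw [pv_nonnil g k hk hg]; simp
    rw [pv_scan _ _ _ habs]
    cases hfind : (PySem.List.pyRange 0 5 1).find? (fun j => st.1.getD (k : Int) [] == st.2.1.getD j []) with
    | none =>
      have hnm := List.find?_eq_none.1 hfind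
      have hcount : ((List.range 5).map (fun (j : Nat) => st.2.1.getD (j : Int) [])).count
          ((PySem.List.pyGet? g (k : Int)).toList) = 0 := by
        rw [List.count_eq_countP, List.countP_eq_zero]
        intro x hx
        obtain ⟨j, hj, rfl⟩ := List.mem_map.1 hx
        have hjm : (j : Int) ∈ PySem.List.pyRange 0 5 1 := by
          rw [PySem.List.mem_pyRange_one]
          constructor
          · positivity
          · exact_mod_cast List.mem_range.1 hj
        have := hnm _ hjm
        rw [hGk, hgvk] at this
        simp only [beq_iff_eq] at this ⊢
        exact fun e => this e.symm
      have hzero : pvAvail g s ((PySem.List.pyGet? g (k : Int)).toList)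
          - pvUsed g s k ((PySem.List.pyGet? g (k : Int)).toList) = 0 := by
        rw [← hC _ hv, hcount]
      have hbv : pvBval g s (k : Int) = "absent" := by
        rw [pvBval_of_ne g s k hk hg hs hce, if_neg (by omega)]
      refine ⟨?_, ?_, ?_⟩
      · rw [hR, ← pv_rdict_succ_of_eq g s k (by rw [hbv, hRv])]
      · intro i hi h5
        exact hG i (by omega) h5
      · intro c hc
        rw [hC c hc]
        have huse : pvUsed g s (k + 1) c = pvUsed g s k c
            + (if c = (PySem.List.pyGet? g (k : Int)).toList then 1 else 0) := by
          unfold pvUsed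
          rw [List.range_succ, List.map_append, List.count_append]
          congr 1
          show List.count c [pvGv g s (k : Int)] = _
          rw [hgvk]
          by_cases hcv : c = (PySem.List.pyGet? g (k : Int)).toList
          · rw [if_pos hcv, hcv, List.count_singleton]
            simp
          · rw [if_neg hcv]
            simp only [List.count_singleton, beq_iff_eq]
            rw [if_neg (fun e => hcv e.symm)]
        rw [huse]
        by_cases hcv : c = (PySem.List.pyGet? g (k : Int)).toList
        · subst hcv
          omega
        · rw [if_neg hcv]
          omega
    | some j0 =>
      have hj0mem := List.mem_of_find?_eq_some hfind
      have hj0 := (PySem.List.mem_pyRange_one).1 hj0mem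
      have hmatch : st.2.1.getD j0 [] = (PySem.List.pyGet? g (k : Int)).toList := by
        have hp := List.find?_some hfind
        rw [beq_iff_eq] at hp
        rw [← hp, hGk, hgvk]
      have hgetm : ((List.range 5).map (fun (j : Nat) => st.2.1.getD (j : Int) []))[j0.toNat]'(by
          simp; omega) = (PySem.List.pyGet? g (k : Int)).toList := by
        rw [List.getElem_map, List.getElem_range, Int.toNat_of_nonneg hj0.1, hmatch]
      have hpos : 0 < ((List.range 5).map (fun (j : Nat) => st.2.1.getD (j : Int) [])).count
          ((PySem.List.pyGet? g (k : Int)).toList) := by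
        apply List.count_pos_iff.2
        exact hgetm ▸ List.getElem_mem _
      have hlt : pvUsed g s k ((PySem.List.pyGet? g (k : Int)).toList)
          < pvAvail g s ((PySem.List.pyGet? g (k : Int)).toList) := by
        have := hC _ hv
        omega
      have hbv : pvBval g s (k : Int) = "present" := by
        rw [pvBval_of_ne g s k hk hg hs hce, if_pos hlt]
      refine ⟨?_, ?_, ?_⟩
      · show st.2.2.insert (k : Int) "present" = pvRdict g s (k + 1)
        rw [hR]
        exact pv_rdict_succ_of_fire g s k hk hbv
      · intro i hi h5
        show (st.1.insert (k : Int) []).getD (i : Int) [] = _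
        rw [PySem.Dict.getD_insert, if_neg (by exact_mod_cast by omega)]
        exact hG i (by omega) h5
      · intro c hc
        show ((List.range 5).map (fun (j : Nat) => (st.2.1.insert j0 []).getD (j : Int) [])).count c = _
        rw [pv_vec_insert st.2.1 j0 hj0.1 hj0.2]
        rw [pv_count_set _ _ (by simp; omega) _ _ hgetm hc]
        rw [hC c hc]
        have huse : pvUsed g s (k + 1) c = pvUsed g s k c
            + (if c = (PySem.List.pyGet? g (k : Int)).toList then 1 else 0) := by
          unfold pvUsed
          rw [List.range_succ, List.map_append, List.count_append]
          congr 1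
          show List.count c [pvGv g s (k : Int)] = _
          rw [hgvk]
          by_cases hcv : c = (PySem.List.pyGet? g (k : Int)).toList
          · rw [if_pos hcv, hcv, List.count_singleton]
            simp
          · rw [if_neg hcv]
            simp only [List.count_singleton, beq_iff_eq]
            rw [if_neg (fun e => hcv e.symm)]
        rw [huse]
        by_cases hcv : c = (PySem.List.pyGet? g (k : Int)).toList
        · subst hcv
          have := hC _ hv
          omega
        · rw [if_neg hcv]
          omega

theorem pvBbody_eq (g s : List Char) (res : PySem.Dict Int String) (i : Int) :
    pvBbody g s res i = res.insert i (pvBval g s i) := by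
  by_cases h : ((PySem.List.pyGet? g i).toList == (PySem.List.pyGet? s i).toList) = true
  · simp [pvBbody, pvBval, h]
  · simp [pvBbody, pvBval, h]

theorem pvB_items (g s : List Char) :
    ((PySem.List.pyRange 0 5 1).foldl (pvBbody g s) PySem.Dict.empty).items
      = [((0 : Int), pvBval g s 0), (1, pvBval g s 1), (2, pvBval g s 2),
         (3, pvBval g s 3), (4, pvBval g s 4)] := by
  have hr : PySem.List.pyRange 0 5 1 = [0, 1, 2, 3, 4] := by decide
  rw [hr]
  simp only [List.foldl_cons, List.foldl_nil, pvBbody_eq]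
  rfl

theorem pvRdict5_items (g s : List Char) :
    (pvRdict g s 5).items
      = [((0 : Int), pvBval g s 0), (1, pvBval g s 1), (2, pvBval g s 2),
         (3, pvBval g s 3), (4, pvBval g s 4)] := by
  unfold pvRdict
  show List.map (fun (i : Nat) => ((i : Int), if i < 5 then pvBval g s (i : Int) else pvRv g s (i : Int)))
      (List.range 5)
    = [((0 : Int), pvBval g s 0), (1, pvBval g s 1), (2, pvBval g s 2),
       (3, pvBval g s 3), (4, pvBval g s 4)]
  norm_num [List.range_succ]

-- ===== VERDICT (by name: the statement is the Claim_ definition above) =====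
set_option maxRecDepth 8192 in
set_option maxHeartbeats 2000000 in
theorem compare_guess_to_solution_spec : Claim_equal_compare_guess_to_solution := by
  intro guess solution _ hPre
  unfold Spec_compare_guess_to_solution compare_guess_to_solution compare_guess_to_solution_alt
  have hg : 5 ≤ guess.toList.length := by
    have h := hPre.1
    rw [PySem.Str.len_eq] at h
    exact_mod_cast h
  have hs : 5 ≤ solution.toList.length := by
    have h := hPre.2
    rw [PySem.Str.len_eq] at h
    exact_mod_cast h
  have key : ((PySem.List.pyRange 0 5 1).foldl pvOuter
        ((PySem.List.pyRange 0 5 1).foldl (pvStep1 guess.toList solution.toList)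
          (PySem.Dict.empty, PySem.Dict.empty, PySem.Dict.empty))).2.2.items
      = ((PySem.List.pyRange 0 5 1).foldl (pvBbody guess.toList solution.toList) PySem.Dict.empty).items := by
    rw [pvB_items]
    have h0 := pv_inv_init guess.toList solution.toList
    have hr : PySem.List.pyRange 0 5 1 = [0, 1, 2, 3, 4] := by decide
    rw [hr]
    simp only [List.foldl_cons, List.foldl_nil]
    have h1 := pv_outer_step guess.toList solution.toList 0 (by omega) hg hs _ h0
    have h2 := pv_outer_step guess.toList solution.toList 1 (by omega) hg hs _ h1
    have h3 := pv_outer_step guess.toList solution.toList 2 (by omega) hg hs _ h2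
    have h4 := pv_outer_step guess.toList solution.toList 3 (by omega) hg hs _ h3
    have h5 := pv_outer_step guess.toList solution.toList 4 (by omega) hg hs _ h4
    rw [hr] at h5
    simp only [List.foldl_cons, List.foldl_nil] at h5
    simp only [Nat.cast_ofNat, Nat.cast_zero, Nat.cast_one] at h5
    rw [h5.1, pvRdict5_items]
  exact congrArg (fun l => (l, if guess = solution then (2 : Int) else 1)) key
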